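-- pv_equiv track=rewrite | github.com/jk-jung/problem-solving | codewars/5kyu/5_Simple Fun #44: Three Split.py | three_split
-- ===== SOURCE A (Python) =====
-- def three_split(v):
--     n = len(v)
--     s = sum(v)
--     if s % 3: return 0
--     s //= 3
--
--     d = [0 for _ in range(n)]
--
--     d[0] = v[0]
--     for i in range(1, n):
--         d[i] = d[i-1] + v[i]
--
--
--     r = 0
--     for i in range(n):
--         if d[i] != s:
--             continue
--         for j in range(i + 1, n - 1):
--             if d[j] - d[i] == s:
--                 r += 1
--     return r
-- ===== SOURCE B (Python) =====
-- def three_split(v):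
--     s = sum(v)
--     if s % 3:
--         return 0
--     t = s // 3
--     r = cnt = pref = 0
--     for x in v[:-1]:
--         pref += x
--         if pref == 2 * t:
--             r += cnt
--         if pref == t:
--             cnt += 1
--     return r
-- ===== Notes on version B (the rewrite author's own statement) =====
-- stated objective: alternative
-- what changed: Replaced A's nested loop over all (i,j) prefix-sum index pairs by a single left-to-right pass that keeps a running prefix sum and a counter of positions with prefix sum s, adding that counter whenever the prefix sum hits 2s before the last element.
import Mathlib
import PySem

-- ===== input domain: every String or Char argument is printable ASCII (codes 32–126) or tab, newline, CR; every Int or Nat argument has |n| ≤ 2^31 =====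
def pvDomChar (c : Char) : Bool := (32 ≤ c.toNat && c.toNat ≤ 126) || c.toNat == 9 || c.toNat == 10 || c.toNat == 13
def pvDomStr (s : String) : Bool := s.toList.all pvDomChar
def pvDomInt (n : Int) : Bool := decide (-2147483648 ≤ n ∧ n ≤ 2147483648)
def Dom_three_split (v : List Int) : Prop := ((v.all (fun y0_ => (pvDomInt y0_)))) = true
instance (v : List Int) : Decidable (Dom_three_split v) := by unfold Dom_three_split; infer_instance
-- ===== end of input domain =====

-- B replaces A's nested double loop over prefix-sum index pairs by a single pass that
-- counts prefix-sum = s indices seen before each prefix-sum = 2s position (objective: alternative).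

-- ===== PORT A =====
-- A fills the array d in place with the recurrence d[0] = v[0]; d[i] = d[i-1] + v[i];
-- buildD builds the same prefix-sum array by the same left-to-right recurrence.
def buildD (acc : Int) : List Int → List Int
  | [] => []
  | x :: xs => (acc + x) :: buildD (acc + x) xs

def three_split (v : List Int) : Int :=
  let n : Int := v.length
  let s := v.sum
  if PySem.Int.mod s 3 ≠ 0 then 0
  else
    let s := PySem.Int.floordiv s 3
    let d := buildD 0 v
    (PySem.List.pyRange 0 n 1).foldl
      (fun r i =>
        if PySem.List.pyGetD d i 0 ≠ s then r
        else
          (PySem.List.pyRange (i + 1) (n - 1) 1).foldl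
            (fun r2 j =>
              if PySem.List.pyGetD d j 0 - PySem.List.pyGetD d i 0 = s then r2 + 1 else r2)
            r)
      0

-- ===== PORT B =====
def three_split_alt (v : List Int) : Int :=
  let s := v.sum
  if PySem.Int.mod s 3 ≠ 0 then 0
  else
    let t := PySem.Int.floordiv s 3
    let st := v.dropLast.foldl
      (fun (st : Int × Int × Int) x =>
        let pref := st.2.2 + x
        let r := if pref = 2 * t then st.1 + st.2.1 else st.1
        let cnt := if pref = t then st.2.1 + 1 else st.2.1
        (r, cnt, pref))
      (0, 0, 0)
    st.1

-- ===== PRECONDITION & SPEC =====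
-- Pre_ excludes only the empty list, on which the Python A raises IndexError at d[0] = v[0].
def Pre_three_split (v : List Int) : Prop := v ≠ []
instance (v : List Int) : Decidable (Pre_three_split v) := by unfold Pre_three_split; infer_instance
def pvWitness_three_split : List Int := [1, 1, 1]

def Spec_three_split (v : List Int) (out : Int) : Prop := out = three_split_alt v
instance (v : List Int) (out : Int) : Decidable (Spec_three_split v out) := by unfold Spec_three_split; infer_instance

-- ===== CLAIM =====
def Claim_equal_three_split : Prop := ∀ (v : List Int), Dom_three_split v → Pre_three_split v → Spec_three_split v (three_split v)

-- ===== LEMMAS AND PROOFS =====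

theorem length_buildD (acc : Int) (xs : List Int) : (buildD acc xs).length = xs.length := by
  induction xs generalizing acc with
  | nil => rfl
  | cons x xs ih => simp [buildD, ih]

theorem buildD_dropLast (acc : Int) (xs : List Int) :
    buildD acc xs.dropLast = (buildD acc xs).dropLast := by
  induction xs generalizing acc with
  | nil => rfl
  | cons x xs ih =>
    cases xs with
    | nil => rfl
    | cons y ys =>
      have h : buildD (acc + x) (y :: ys) ≠ [] := by
        intro h; have := length_buildD (acc + x) (y :: ys); rw [h] at this; simp at this
      show buildD acc (x :: (y :: ys).dropLast) = ((acc + x) :: buildD (acc + x) (y :: ys)).dropLast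
      rw [List.dropLast_cons_of_ne_nil h]
      show (acc + x) :: buildD (acc + x) (y :: ys).dropLast = _
      rw [ih]

-- A's structural reference: for each position i with value e and rest q,
-- contribute (if e = t) the number of j in the rest-minus-last with d[j] - e = t.
def aRefA (t : Int) : List Int → Int
  | [] => 0
  | e :: q => (if e = t then ((q.dropLast.countP (fun x => decide (x - e = t)) : Nat) : Int) else 0) + aRefA t q

-- B's structural reference: one pass carrying c = number of t-prefixes seen so far.
def cntPairs (t c : Int) : List Int → Int
  | [] => 0
  | e :: q => (if e = 2 * t then c else 0) + cntPairs t (if e = t then c + 1 else c) q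

def aCount (t : Int) : List Int → Int
  | [] => 0
  | e :: q => (if e = t then ((q.countP (fun x => decide (x = 2 * t)) : Nat) : Int) else 0) + aCount t q

theorem dropLast_cons_drop (e : Int) (q : List Int) (k : Nat) :
    ((e :: q).dropLast).drop (k + 1) = q.dropLast.drop k := by
  cases q with
  | nil => simp
  | cons y ys => rw [List.dropLast_cons₂]; rfl

theorem getD_dropLast (d : List Int) (j : Nat) (h : j + 1 < d.length) :
    d.dropLast.getD j 0 = d.getD j 0 := by
  have hj : j < d.dropLast.length := by simp [List.length_dropLast]; omega
  rw [List.getD_eq_getElem _ _ hj, List.getD_eq_getElem _ _ (by omega : j < d.length)]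
  simp [List.getElem_dropLast]

-- inner loop of A = count over the tail of d.dropLast
theorem inner_count (d : List Int) (s r i : Int) (hi : 0 ≤ i) :
    (PySem.List.pyRange (i + 1) ((d.length : Int) - 1) 1).foldl
      (fun r2 j => if PySem.List.pyGetD d j 0 - PySem.List.pyGetD d i 0 = s then r2 + 1 else r2) r
    = r + ((d.dropLast.drop (i + 1).toNat).countP
        (fun x => decide (x - PySem.List.pyGetD d i 0 = s)) : Int) := by
  have hlen : (d.dropLast.length : Int) = (d.length : Int) - 1 ∨ d = [] := by
    cases d with
    | nil => exact Or.inr rfl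
    | cons a l => left; simp [List.length_dropLast]
  rcases hlen with hlen | rfl
  · have hcong : ∀ (acc : Int), ∀ j ∈ PySem.List.pyRange (i + 1) ((d.length : Int) - 1) 1,
        (if PySem.List.pyGetD d j 0 - PySem.List.pyGetD d i 0 = s then acc + 1 else acc)
        = (if PySem.List.pyGetD d.dropLast j 0 - PySem.List.pyGetD d i 0 = s then acc + 1 else acc) := by
      intro acc j hj
      rw [PySem.List.mem_pyRange_one] at hj
      have h0j : 0 ≤ j := by omega
      have hjn : j.toNat + 1 < d.length := by omega
      have : PySem.List.pyGetD d j 0 = PySem.List.pyGetD d.dropLast j 0 := by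
        rw [show j = ((j.toNat : Nat) : Int) by omega, PySem.List.pyGetD_natCast,
          PySem.List.pyGetD_natCast, getD_dropLast d j.toNat hjn]
      rw [this]
    rw [PySem.List.foldl_congr_mem _ _ _ _ hcong]
    have hb : ((d.length : Int) - 1) = PySem.List.len d.dropLast := by
      simp [PySem.List.len]; omega
    rw [hb, PySem.List.foldl_pyRange_pyGetD d.dropLast 0
      (fun acc x => if x - PySem.List.pyGetD d i 0 = s then acc + 1 else acc) r (by omega)]
    simpa using PySem.List.foldl_count_if
      (fun x => decide (x - PySem.List.pyGetD d i 0 = s)) (List.drop (i + 1).toNat d.dropLast) r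
  · rw [PySem.List.pyRange_one_eq_nil (by simp; omega)]
    simp

-- index-sum over d = A's structural reference
theorem sum_gNat (s : Int) (d : List Int) :
    ((List.range d.length).map (fun k =>
      if d.getD k 0 = s then
        ((d.dropLast.drop (k + 1)).countP (fun x => decide (x - d.getD k 0 = s)) : Int)
      else 0)).sum = aRefA s d := by
  induction d with
  | nil => rfl
  | cons e q ih =>
    rw [show (e :: q).length = q.length + 1 from rfl, List.range_succ_eq_map]
    simp only [List.map_cons, List.map_map, List.sum_cons]
    have h0 : ((e :: q).dropLast).drop 1 = q.dropLast := dropLast_cons_drop e q 0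
    have hshift : ((List.range q.length).map (fun k =>
        if (e :: q).getD (k + 1) 0 = s then
          (((e :: q).dropLast.drop (k + 1 + 1)).countP
            (fun x => decide (x - (e :: q).getD (k + 1) 0 = s)) : Int)
        else 0)) = ((List.range q.length).map (fun k =>
        if q.getD k 0 = s then
          ((q.dropLast.drop (k + 1)).countP (fun x => decide (x - q.getD k 0 = s)) : Int)
        else 0)) := by
      apply List.map_congr_left
      intro k _
      rw [show (e :: q).getD (k + 1) 0 = q.getD k 0 from rfl, dropLast_cons_drop e q (k + 1)]
    rw [show ((fun k => if (e :: q).getD k 0 = s then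
          (((e :: q).dropLast.drop (k + 1)).countP
            (fun x => decide (x - (e :: q).getD k 0 = s)) : Int)
        else 0) ∘ (fun k => k + 1)) = (fun k =>
        if (e :: q).getD (k + 1) 0 = s then
          (((e :: q).dropLast.drop (k + 1 + 1)).countP
            (fun x => decide (x - (e :: q).getD (k + 1) 0 = s)) : Int)
        else 0) from rfl, hshift, ih]
    show _ = aRefA s (e :: q)
    rw [aRefA, show (e :: q).getD 0 0 = e from rfl, h0]

theorem aRefA_eq_aCount (t : Int) (d : List Int) : aRefA t d = aCount t d.dropLast := by
  induction d with
  | nil => rfl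
  | cons e q ih =>
    cases q with
    | nil => simp [aRefA, aCount]
    | cons y ys =>
      rw [aRefA, ih, List.dropLast_cons₂, aCount]
      congr 1
      by_cases he : e = t
      · subst he
        rw [if_pos rfl, if_pos rfl]
        exact congrArg _ (List.countP_congr (by intro x _; simp only [decide_eq_true_eq]; omega))
      · simp [he]

theorem cntPairs_add (t c : Int) (q : List Int) :
    cntPairs t c q = c * ((q.countP (fun x => decide (x = 2 * t)) : Nat) : Int) + cntPairs t 0 q := by
  induction q generalizing c with
  | nil => simp [cntPairs]
  | cons e q ih =>
    rw [cntPairs, cntPairs, ih, ih (if e = t then 0 + 1 else 0)]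
    by_cases h2 : e = 2 * t <;> by_cases h1 : e = t <;>
      simp [h1, h2, List.countP_cons] <;> split_ifs <;> ring

theorem cntPairs_eq_aCount (t : Int) (q : List Int) : cntPairs t 0 q = aCount t q := by
  induction q with
  | nil => rfl
  | cons e q ih =>
    rw [cntPairs, aCount, cntPairs_add, ← ih]
    by_cases h1 : e = t <;> simp [h1]

theorem foldl_B (t : Int) (xs : List Int) (r c p : Int) :
    (xs.foldl
      (fun (st : Int × Int × Int) x =>
        let pref := st.2.2 + x
        let r := if pref = 2 * t then st.1 + st.2.1 else st.1
        let cnt := if pref = t then st.2.1 + 1 else st.2.1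
        (r, cnt, pref))
      (r, c, p)).1 = r + cntPairs t c (buildD p xs) := by
  induction xs generalizing r c p with
  | nil => simp [buildD, cntPairs]
  | cons x xs ih =>
    rw [List.foldl_cons]
    show (xs.foldl _ (if p + x = 2 * t then r + c else r, if p + x = t then c + 1 else c, p + x)).1 = _
    rw [ih, buildD, cntPairs]
    by_cases h2 : p + x = 2 * t <;> by_cases h1 : p + x = t <;> simp [h1, h2] <;>
      split_ifs <;> ring

theorem three_split_spec : Claim_equal_three_split := by
  intro v _ _
  unfold Spec_three_split three_split three_split_alt
  by_cases hm : PySem.Int.mod v.sum 3 = 0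
  · simp only [hm, ne_eq, not_true_eq_false, if_false]
    set s := PySem.Int.floordiv v.sum 3 with hs
    set d := buildD 0 v with hd
    have hlen : (v.length : Int) = (d.length : Int) := by rw [hd, length_buildD]
    -- A side
    have hcong : ∀ (r : Int), ∀ i ∈ PySem.List.pyRange 0 (v.length : Int) 1,
        (if PySem.List.pyGetD d i 0 ≠ s then r
         else (PySem.List.pyRange (i + 1) ((v.length : Int) - 1) 1).foldl
            (fun r2 j => if PySem.List.pyGetD d j 0 - PySem.List.pyGetD d i 0 = s then r2 + 1 else r2) r)
        = r + (if PySem.List.pyGetD d i 0 = s then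
            ((d.dropLast.drop (i + 1).toNat).countP
              (fun x => decide (x - PySem.List.pyGetD d i 0 = s)) : Int) else 0) := by
      intro r i hi
      rw [PySem.List.mem_pyRange_one] at hi
      by_cases he : PySem.List.pyGetD d i 0 = s
      · rw [if_neg (not_not_intro he), if_pos he, hlen, inner_count d s r i hi.1]
      · rw [if_pos he, if_neg he]; ring
    rw [PySem.List.foldl_congr_mem _ _ _ _ hcong, PySem.List.foldl_add]
    rw [hlen, PySem.List.pyRange_zero_nat, List.map_map, zero_add]
    have hA : ((List.range d.length).map ((fun i =>
        if PySem.List.pyGetD d i 0 = s then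
          ((d.dropLast.drop (i + 1).toNat).countP
            (fun x => decide (x - PySem.List.pyGetD d i 0 = s)) : Int) else 0) ∘ (fun k : Nat => (k : Int)))).sum
        = aRefA s d := by
      rw [← sum_gNat s d]
      apply congrArg
      apply List.map_congr_left
      intro k _
      simp only [Function.comp, PySem.List.pyGetD_natCast]
      rw [show ((k : Int) + 1).toNat = k + 1 by omega]
    rw [hA, aRefA_eq_aCount, ← cntPairs_eq_aCount, ← buildD_dropLast]
    rw [foldl_B s v.dropLast 0 0 0, zero_add]
  · simp only [hm, ne_eq, not_false_eq_true, if_true]
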